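-- pv_equiv track=rewrite | github.com/leeminHong1990/YiWuMJ | kbengine/assets/scripts/common/utility.py | checkIsPongPongWin
-- ===== SOURCE A (Python) =====
-- def getTile2NumDict(tiles):
-- 	tile2NumDict = {}
-- 	for t in tiles:
-- 		tile2NumDict[t] = tile2NumDict.get(t, 0) + 1
-- 	return tile2NumDict
--
-- def checkIsPongPongWin(handTilesButKing, uptiles, kingTilesNum):
-- 	for meld in uptiles:
-- 		if (len(meld) != 3 and len(meld) != 4) or meld[0] != meld[-1]:
-- 			return False
-- 	tiles = handTilesButKing[:]
-- 	tile2NumDict = getTile2NumDict(tiles)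
-- 	isDelete = False
-- 	for t in tile2NumDict:
-- 		if tile2NumDict[t] == 2:
-- 			del tile2NumDict[t]
-- 			isDelete = True
-- 			break
-- 	else:
-- 		for t in tile2NumDict:
-- 			if tile2NumDict[t] == 1:
-- 				del tile2NumDict[t]
-- 				kingTilesNum -= 1
-- 				isDelete = True
-- 				break
-- 		else:
-- 			for t in tile2NumDict:
-- 				if tile2NumDict[t] == 4:
-- 					del tile2NumDict[t]
-- 					kingTilesNum -= 1
-- 					isDelete = True
-- 					break
-- 			else:
-- 				for t in tile2NumDict:
-- 					if tile2NumDict[t] == 3: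
-- 						tile2NumDict[t] = 1
-- 						isDelete = True
-- 						break
-- 	for t in tile2NumDict:
-- 		needNum = abs(3 - tile2NumDict[t])
-- 		kingTilesNum -= needNum
-- 	if not isDelete or kingTilesNum < 0:
-- 		return False
-- 	return True
-- ===== SOURCE B (Python) =====
-- def checkIsPongPongWin(handTilesButKing, uptiles, kingTilesNum):
--     if not all(len(m) in (3, 4) and m[0] == m[-1] for m in uptiles):
--         return False
--     counts = {}
--     for t in handTilesButKing:
--         counts[t] = counts.get(t, 0) + 1
--     vals = counts.values()
--     total = sum(abs(3 - c) for c in vals)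
--     if 2 in vals:
--         remaining = kingTilesNum - (total - 1)
--     elif 1 in vals:
--         remaining = kingTilesNum + 1 - total
--     elif 4 in vals:
--         remaining = kingTilesNum - total
--     elif 3 in vals:
--         remaining = kingTilesNum - total - 2
--     else:
--         return False
--     return remaining >= 0
-- ===== Notes on version B (the rewrite author's own statement) =====
-- stated objective: simpler
-- what changed: Instead of mutating the count dict (delete/rewrite the chosen eye tile, then a second pass summing abs(3-count)), B computes total = sum(abs(3-c)) once over the untouched counts and folds the chosen branch's effect on the wildcard budget into closed-form arithmetic, ending with a single comparison.
import Mathlib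
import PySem

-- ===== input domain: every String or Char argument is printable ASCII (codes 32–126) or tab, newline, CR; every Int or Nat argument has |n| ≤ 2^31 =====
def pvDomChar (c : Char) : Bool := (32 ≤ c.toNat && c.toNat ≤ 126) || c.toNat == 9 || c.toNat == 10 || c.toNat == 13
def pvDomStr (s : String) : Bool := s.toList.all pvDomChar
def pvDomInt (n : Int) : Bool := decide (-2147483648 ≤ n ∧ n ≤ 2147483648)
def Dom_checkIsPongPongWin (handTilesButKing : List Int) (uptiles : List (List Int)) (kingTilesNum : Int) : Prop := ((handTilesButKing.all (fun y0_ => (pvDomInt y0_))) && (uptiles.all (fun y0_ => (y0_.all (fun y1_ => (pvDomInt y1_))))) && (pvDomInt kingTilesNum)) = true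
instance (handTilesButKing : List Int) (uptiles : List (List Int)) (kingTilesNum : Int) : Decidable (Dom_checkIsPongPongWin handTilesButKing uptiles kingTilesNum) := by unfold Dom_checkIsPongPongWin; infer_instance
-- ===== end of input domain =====

-- B replaces A's dict mutation (delete/rewrite the chosen eye tile, then a second summing pass)
-- by one pass computing total = sum |3 - count| and closed-form arithmetic per eye branch (objective: simpler).

-- ===== PORT A =====
-- the meld-validation loop (early 'return False' becomes recursion returning false)
def pvMeldsOk : List (List Int) → Bool
  | [] => true
  | m :: rest =>
    if (m.length ≠ 3 ∧ m.length ≠ 4) ∨ PySem.List.pyGet? m 0 ≠ PySem.List.pyGet? m (-1) then false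
    else pvMeldsOk rest

-- helper getTile2NumDict
def pvGetTile2NumDict (tiles : List Int) : PySem.Dict Int Int :=
  tiles.foldl (fun d t => d.insert t (d.getD t 0 + 1)) PySem.Dict.empty

-- 'for t in dict: if dict[t] == v: … break' — first key (insertion order) with the value
def pvFindKey (d : PySem.Dict Int Int) (v : Int) : Option Int :=
  d.keys.find? (fun t => d.getD t 0 == v)

-- the four chained for/else loops: result (dict after mutation, kingTilesNum, isDelete)
def pvEyePick (d : PySem.Dict Int Int) (king : Int) : PySem.Dict Int Int × Int × Bool :=
  match pvFindKey d 2 with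
  | some t => (d.erase t, king, true)
  | none =>
    match pvFindKey d 1 with
    | some t => (d.erase t, king - 1, true)
    | none =>
      match pvFindKey d 4 with
      | some t => (d.erase t, king - 1, true)
      | none =>
        match pvFindKey d 3 with
        | some t => (d.insert t 1, king, true)
        | none => (d, king, false)

-- the final 'for t in tile2NumDict: kingTilesNum -= abs(3 - tile2NumDict[t])'
def pvDeduct (items : List (Int × Int)) (king : Int) : Int :=
  items.foldl (fun acc p => acc - |3 - p.2|) king

def checkIsPongPongWin (handTilesButKing : List Int) (uptiles : List (List Int)) (kingTilesNum : Int) : Bool :=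
  if pvMeldsOk uptiles = false then false
  else
    match pvEyePick (pvGetTile2NumDict handTilesButKing) kingTilesNum with
    | (d2, king2, isDelete) =>
      if isDelete = false ∨ pvDeduct d2.items king2 < 0 then false else true

-- ===== PORT B =====
def pvMeldOk1 (m : List Int) : Bool :=
  (m.length == 3 || m.length == 4) && (PySem.List.pyGet? m 0 == PySem.List.pyGet? m (-1))

def pvCountsB (tiles : List Int) : PySem.Dict Int Int :=
  tiles.foldl (fun d t => d.insert t (d.getD t 0 + 1)) PySem.Dict.empty

def checkIsPongPongWin_alt (handTilesButKing : List Int) (uptiles : List (List Int)) (kingTilesNum : Int) : Bool :=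
  if !(uptiles.all pvMeldOk1) then false
  else
    let vals := (pvCountsB handTilesButKing).values
    let total := (vals.map (fun c => |3 - c|)).sum
    if vals.contains 2 then decide (0 ≤ kingTilesNum - (total - 1))
    else if vals.contains 1 then decide (0 ≤ kingTilesNum + 1 - total)
    else if vals.contains 4 then decide (0 ≤ kingTilesNum - total)
    else if vals.contains 3 then decide (0 ≤ kingTilesNum - total - 2)
    else false

-- ===== PRECONDITION & SPEC =====
def Spec_checkIsPongPongWin (handTilesButKing : List Int) (uptiles : List (List Int)) (kingTilesNum : Int) (out : Bool) : Prop := out = checkIsPongPongWin_alt handTilesButKing uptiles kingTilesNum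
instance (handTilesButKing : List Int) (uptiles : List (List Int)) (kingTilesNum : Int) (out : Bool) : Decidable (Spec_checkIsPongPongWin handTilesButKing uptiles kingTilesNum out) := by unfold Spec_checkIsPongPongWin; infer_instance

-- ===== CLAIM (what is proved, stated in full; the proofs are below) =====
def Claim_equal_checkIsPongPongWin : Prop := ∀ (handTilesButKing : List Int) (uptiles : List (List Int)) (kingTilesNum : Int), Dom_checkIsPongPongWin handTilesButKing uptiles kingTilesNum → Spec_checkIsPongPongWin handTilesButKing uptiles kingTilesNum (checkIsPongPongWin handTilesButKing uptiles kingTilesNum)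

-- ===== LEMMAS AND PROOFS =====

lemma meldsOk_eq_all (u : List (List Int)) : pvMeldsOk u = u.all pvMeldOk1 := by
  induction u with
  | nil => rfl
  | cons m rest ih =>
    by_cases hc : (m.length ≠ 3 ∧ m.length ≠ 4) ∨ PySem.List.pyGet? m 0 ≠ PySem.List.pyGet? m (-1)
    · have hb : pvMeldOk1 m = false := by
        simp only [pvMeldOk1]
        simp only [Bool.and_eq_false_iff, Bool.or_eq_false_iff, beq_eq_false_iff_ne]
        tauto
      simp [pvMeldsOk, hc, hb]
    · have h12 : m.length = 3 ∨ m.length = 4 := by tauto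
      have hgg : PySem.List.pyGet? m 0 = PySem.List.pyGet? m (-1) := by tauto
      have hb : pvMeldOk1 m = true := by
        simp only [pvMeldOk1, Bool.and_eq_true, Bool.or_eq_true, beq_iff_eq]
        exact ⟨h12, hgg⟩
      simp [pvMeldsOk, hc, hb, ih]

lemma deduct_eq (l : List (Int × Int)) (k : Int) :
    pvDeduct l k = k - (l.map (fun p => |3 - p.2|)).sum := by
  induction l generalizing k with
  | nil => simp [pvDeduct]
  | cons a l ih =>
    have h1 : pvDeduct (a :: l) k = pvDeduct l (k - |3 - a.2|) := rfl
    rw [h1, ih]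
    simp only [List.map_cons, List.sum_cons]
    ring

lemma ite_lt_zero (x : Int) : (if x < 0 then false else true) = decide (0 ≤ x) := by
  split_ifs with hlt
  · simp; omega
  · simp; omega

lemma final_step (X Y : Int) (hXY : (0 ≤ X) ↔ (0 ≤ Y)) :
    (if true = false ∨ X < 0 then false else true) = decide (0 ≤ Y) := by
  have h1 : (true = false ∨ X < 0) ↔ X < 0 := by simp
  rw [if_congr h1 rfl rfl, ite_lt_zero]
  exact decide_eq_decide.mpr hXY

lemma sum_map_filter_ne (l : List (Int × Int)) (t v : Int) (f : Int × Int → Int)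
    (hnd : (l.map Prod.fst).Nodup) (hm : (t, v) ∈ l) :
    ((l.filter (fun p => !(p.1 == t))).map f).sum = (l.map f).sum - f (t, v) := by
  induction l with
  | nil => cases hm
  | cons a l ih =>
    simp only [List.map_cons, List.nodup_cons] at hnd
    rcases List.mem_cons.mp hm with heq | hm
    · subst heq
      have hkeep : l.filter (fun p => !(p.1 == t)) = l := by
        apply List.filter_eq_self.mpr
        intro p hp
        simp only [Bool.not_eq_eq_eq_not, Bool.not_true, beq_eq_false_iff_ne]
        intro hpt
        exact hnd.1 (List.mem_map.mpr ⟨p, hp, hpt⟩)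
      simp [hkeep]
    · have hat : (a.1 == t) = false := by
        simp only [beq_eq_false_iff_ne]
        intro hdeq
        exact hnd.1 (hdeq ▸ List.mem_map.mpr ⟨(t, v), hm, rfl⟩)
      simp only [List.filter_cons, hat, Bool.not_false, if_pos, List.map_cons, List.sum_cons,
        ih hnd.2 hm]
      ring

lemma sum_map_replace (l : List (Int × Int)) (t v w : Int) (f : Int × Int → Int)
    (hnd : (l.map Prod.fst).Nodup) (hm : (t, v) ∈ l) :
    ((l.map (fun p => if p.1 == t then (t, w) else p)).map f).sum
      = (l.map f).sum - f (t, v) + f (t, w) := by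
  induction l with
  | nil => cases hm
  | cons a l ih =>
    simp only [List.map_cons, List.nodup_cons] at hnd
    rcases List.mem_cons.mp hm with heq | hm
    · subst heq
      have hkeep : l.map (fun p => if p.1 == t then (t, w) else p) = l := by
        conv_rhs => rw [← List.map_id l]
        apply List.map_congr_left
        intro p hp
        have hpt : p.1 ≠ t := fun hh => hnd.1 (hh ▸ List.mem_map.mpr ⟨p, hp, rfl⟩)
        simp [beq_eq_false_iff_ne.mpr hpt]
      have hhd : ((((t, v).1 : Int) == t)) = true := by simp
      simp only [List.map_cons, hhd, if_pos, List.sum_cons, hkeep]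
      ring
    · have hat : (a.1 == t) = false := by
        simp only [beq_eq_false_iff_ne]
        intro hdeq
        exact hnd.1 (hdeq ▸ List.mem_map.mpr ⟨(t, v), hm, rfl⟩)
      simp only [List.map_cons, hat, Bool.false_eq_true, if_false, List.sum_cons, ih hnd.2 hm]
      ring

-- facts about the shared counting dict
lemma countsA_eq (h : List Int) : pvGetTile2NumDict h = PySem.Dict.counter h :=
  PySem.Dict.foldl_insert_getD_add_one_eq_counter h

lemma countsB_eq (h : List Int) : pvCountsB h = PySem.Dict.counter h :=
  PySem.Dict.foldl_insert_getD_add_one_eq_counter h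

lemma values_counter_eq (h : List Int) :
    (PySem.Dict.counter h (κ := Int)).values
      = (PySem.Set.ofList h).map (fun t => (h.count t : Int)) := by
  simp [PySem.Dict.values, PySem.Dict.items_counter, List.map_map, Function.comp]

lemma nodup_fst_items_counter (h : List Int) :
    ((PySem.Dict.counter h (κ := Int)).items.map Prod.fst).Nodup := by
  have : (PySem.Dict.counter h (κ := Int)).items.map Prod.fst
      = (PySem.Dict.counter h (κ := Int)).keys := rfl
  rw [this, PySem.Dict.keys_counter]
  exact PySem.Set.nodup_ofList h

lemma contains_values_counter (h : List Int) (v : Int) :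
    (PySem.Dict.counter h (κ := Int)).values.contains v = true
      ↔ ∃ t ∈ PySem.Set.ofList h, (h.count t : Int) = v := by
  rw [values_counter_eq]
  simp [List.mem_map]

lemma findKey_counter_none (h : List Int) (v : Int) :
    pvFindKey (PySem.Dict.counter h) v = none
      ↔ ∀ t ∈ PySem.Set.ofList h, (h.count t : Int) ≠ v := by
  simp [pvFindKey, PySem.Dict.keys_counter, List.find?_eq_none, PySem.Dict.getD_counter]

lemma findKey_counter_some (h : List Int) (v t : Int)
    (hf : pvFindKey (PySem.Dict.counter h) v = some t) :
    t ∈ PySem.Set.ofList h ∧ (h.count t : Int) = v := by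
  have hmem := List.mem_of_find?_eq_some hf
  have hpred := List.find?_some hf
  rw [PySem.Dict.keys_counter] at hmem
  rw [PySem.Dict.getD_counter] at hpred
  exact ⟨hmem, by simpa using hpred⟩

lemma contains_values_counter_false (h : List Int) (v : Int)
    (hf : pvFindKey (PySem.Dict.counter h) v = none) :
    (PySem.Dict.counter h (κ := Int)).values.contains v = false := by
  cases hb : (PySem.Dict.counter h (κ := Int)).values.contains v with
  | false => rfl
  | true =>
    obtain ⟨t, ht, hv⟩ := (contains_values_counter h v).mp hb
    exact absurd hv ((findKey_counter_none h v).mp hf t ht)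

lemma contains_values_counter_true (h : List Int) (v t : Int)
    (hf : pvFindKey (PySem.Dict.counter h) v = some t) :
    (PySem.Dict.counter h (κ := Int)).values.contains v = true := by
  obtain ⟨ht, hv⟩ := findKey_counter_some h v t hf
  exact (contains_values_counter h v).mpr ⟨t, ht, hv⟩

lemma mem_items_counter_of_mem (h : List Int) (t : Int) (ht : t ∈ PySem.Set.ofList h) :
    (t, (h.count t : Int)) ∈ (PySem.Dict.counter h (κ := Int)).items := by
  rw [PySem.Dict.items_counter]
  exact List.mem_map.mpr ⟨t, ht, rfl⟩

lemma total_values_eq (h : List Int) :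
    ((PySem.Dict.counter h (κ := Int)).values.map (fun c => |3 - c|)).sum
      = ((PySem.Dict.counter h (κ := Int)).items.map (fun p => |3 - p.2|)).sum := by
  simp only [PySem.Dict.values, List.map_map, Function.comp_def]

lemma erase_items (d : PySem.Dict Int Int) (t : Int) :
    (d.erase t).items = d.items.filter (fun p => !(p.1 == t)) := rfl

-- ===== VERDICT (by name: the statement is the Claim_ definition above) =====
theorem checkIsPongPongWin_spec : Claim_equal_checkIsPongPongWin := by
  intro h u k _
  unfold Spec_checkIsPongPongWin checkIsPongPongWin checkIsPongPongWin_alt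
  rw [meldsOk_eq_all]
  cases hall : u.all pvMeldOk1 with
  | false => simp
  | true =>
    simp only [Bool.not_true, Bool.true_eq_false, Bool.false_eq_true, if_false]
    rw [countsA_eq, countsB_eq]
    have hnd := nodup_fst_items_counter h
    unfold pvEyePick
    cases hf2 : pvFindKey (PySem.Dict.counter h) 2 with
    | some t =>
      obtain ⟨ht, hv⟩ := findKey_counter_some h 2 t hf2
      rw [contains_values_counter_true h 2 t hf2]
      simp only [if_pos]
      rw [deduct_eq, erase_items,
        sum_map_filter_ne _ t ((h.count t : Int)) _ hnd (mem_items_counter_of_mem h t ht),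
        hv, total_values_eq]
      have habs : |(3:Int) - 2| = 1 := by decide
      rw [habs]
      exact final_step _ _ (by omega)
    | none =>
      rw [contains_values_counter_false h 2 hf2]
      simp only [Bool.false_eq_true, if_false]
      cases hf1 : pvFindKey (PySem.Dict.counter h) 1 with
      | some t =>
        obtain ⟨ht, hv⟩ := findKey_counter_some h 1 t hf1
        rw [contains_values_counter_true h 1 t hf1]
        simp only [if_pos]
        rw [deduct_eq, erase_items,
          sum_map_filter_ne _ t ((h.count t : Int)) _ hnd (mem_items_counter_of_mem h t ht),
          hv, total_values_eq]
        have habs : |(3:Int) - 1| = 2 := by decide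
        rw [habs]
        exact final_step _ _ (by omega)
      | none =>
        rw [contains_values_counter_false h 1 hf1]
        simp only [Bool.false_eq_true, if_false]
        cases hf4 : pvFindKey (PySem.Dict.counter h) 4 with
        | some t =>
          obtain ⟨ht, hv⟩ := findKey_counter_some h 4 t hf4
          rw [contains_values_counter_true h 4 t hf4]
          simp only [if_pos]
          rw [deduct_eq, erase_items,
            sum_map_filter_ne _ t ((h.count t : Int)) _ hnd (mem_items_counter_of_mem h t ht),
            hv, total_values_eq]
          have habs : |(3:Int) - 4| = 1 := by decide
          rw [habs]
          exact final_step _ _ (by omega)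
        | none =>
          rw [contains_values_counter_false h 4 hf4]
          simp only [Bool.false_eq_true, if_false]
          cases hf3 : pvFindKey (PySem.Dict.counter h) 3 with
          | some t =>
            obtain ⟨ht, hv⟩ := findKey_counter_some h 3 t hf3
            rw [contains_values_counter_true h 3 t hf3]
            simp only [if_pos]
            have hcont3 : (PySem.Dict.counter h (κ := Int)).contains t = true := by
              have hmem : t ∈ (PySem.Dict.counter h (κ := Int)).keys := by
                rw [PySem.Dict.keys_counter]; exact ht
              first
                | exact PySem.Dict.contains_iff_mem_keys.mpr hmem
                | simpa [PySem.Dict.contains_iff_mem_keys] using hmem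
            rw [deduct_eq, PySem.Dict.items_insert]
            rw [if_pos hcont3]
            rw [sum_map_replace _ t ((h.count t : Int)) 1 _ hnd (mem_items_counter_of_mem h t ht),
              hv, total_values_eq]
            have habs3 : |(3:Int) - 3| = 0 := by decide
            have habs1 : |(3:Int) - 1| = 2 := by decide
            rw [habs3, habs1]
            exact final_step _ _ (by omega)
          | none =>
            rw [contains_values_counter_false h 3 hf3]
            simp
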